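-- pv_equiv track=rewrite | github.com/JLSteenwyk/PhyKIT | tests/unit/services/alignment/test_dfoil.py | _build_alignment_from_patterns
-- ===== SOURCE A (Python) =====
-- def _build_alignment_from_patterns(patterns):
--     """Build a FASTA alignment from a list of 5-character pattern strings.
--
--     Each pattern has positions: P1, P2, P3, P4, O.
--     A = matches outgroup (use nucleotide 'A'), B = differs (use nucleotide 'C').
--     Outgroup is always 'A'.
--     """
--     p1_seq = ''.join('A' if p[0] == 'A' else 'C' for p in patterns)
--     p2_seq = ''.join('A' if p[1] == 'A' else 'C' for p in patterns)
--     p3_seq = ''.join('A' if p[2] == 'A' else 'C' for p in patterns)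
--     p4_seq = ''.join('A' if p[3] == 'A' else 'C' for p in patterns)
--     o_seq = ''.join('A' if p[4] == 'A' else 'C' for p in patterns)
--     return {
--         "P1": p1_seq,
--         "P2": p2_seq,
--         "P3": p3_seq,
--         "P4": p4_seq,
--         "Outgroup": o_seq,
--     }
-- ===== SOURCE B (Python) =====
-- def _build_alignment_from_patterns(patterns):
--     """Transpose-based: turn each pattern into its 5-position row, zip the rows
--     into columns, and translate each whole column into one sequence of a
--     pre-keyed dict."""
--     result = dict.fromkeys(("P1", "P2", "P3", "P4", "Outgroup"), '')
--     rows = ((p[0], p[1], p[2], p[3], p[4]) for p in patterns)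
--     for key, col in zip(result, zip(*rows)):
--         result[key] = ''.join('A' if c == 'A' else 'C' for c in col)
--     return result
-- ===== Notes on version B (the rewrite author's own statement) =====
-- stated objective: alternative
-- what changed: B slices each pattern to a 5-char row, transposes the rows into columns with zip(*...), and translates each whole column into one sequence of a dict pre-keyed by dict.fromkeys, instead of A's five independent per-position scans of the pattern list.
import Mathlib
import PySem

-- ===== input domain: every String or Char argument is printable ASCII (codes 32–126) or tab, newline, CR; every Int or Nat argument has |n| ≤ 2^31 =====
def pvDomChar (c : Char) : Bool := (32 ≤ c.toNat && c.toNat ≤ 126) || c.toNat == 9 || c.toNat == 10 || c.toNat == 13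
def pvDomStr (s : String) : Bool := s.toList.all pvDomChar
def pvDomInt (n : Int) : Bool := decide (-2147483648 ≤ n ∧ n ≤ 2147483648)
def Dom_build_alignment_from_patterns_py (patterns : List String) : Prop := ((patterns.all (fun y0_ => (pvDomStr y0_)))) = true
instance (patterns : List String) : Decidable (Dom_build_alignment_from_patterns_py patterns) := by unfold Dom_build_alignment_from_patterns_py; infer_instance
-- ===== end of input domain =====

-- B slices each pattern to a 5-char row, transposes the rows into columns with zip(*...),
-- and translates each whole column into a sequence of a pre-keyed dict, instead of A's
-- five independent per-position scans; return values are identical on Pre_.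

-- ===== PORT A =====
-- p[i] == 'A' ? 'A' : 'C' (out-of-range index reads as 'C'; Pre_ excludes those inputs, where Python raises IndexError)
def nucAt (p : String) (i : Int) : Char :=
  if PySem.Str.pyGet? p i = some 'A' then 'A' else 'C'

def build_alignment_from_patterns_py (patterns : List String) : List (String × String) :=
  let p1_seq := String.ofList (patterns.map (fun p => nucAt p 0))
  let p2_seq := String.ofList (patterns.map (fun p => nucAt p 1))
  let p3_seq := String.ofList (patterns.map (fun p => nucAt p 2))
  let p4_seq := String.ofList (patterns.map (fun p => nucAt p 3))
  let o_seq  := String.ofList (patterns.map (fun p => nucAt p 4))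
  [("P1", p1_seq), ("P2", p2_seq), ("P3", p3_seq), ("P4", p4_seq), ("Outgroup", o_seq)]

-- ===== PORT B =====
-- 'A' if c == 'A' else 'C'
def nucOf (c : Char) : Char := if c == 'A' then 'A' else 'C'

-- zip(*rows), ported by zip's semantics: columns 0..min(len(row))-1
def pyZipCols (rows : List (List Char)) : List (List Char) :=
  match (rows.map List.length).min? with
  | none => []
  | some m => (List.range m).map (fun i => rows.map (fun r => r.getD i 'A'))

-- result[key] = v on an existing key of an insertion-ordered dict (keys are unique)
def setVal (d : List (String × String)) (k : String) (v : String) : List (String × String) :=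
  d.map (fun e => if e.1 == k then (e.1, v) else e)

-- (p[0], p[1], p[2], p[3], p[4]); the default of pyGetD is never read under Pre_
-- (where every pattern has length ≥ 5; Python raises IndexError on shorter ones)
def rowOf (p : String) : List Char :=
  [PySem.List.pyGetD p.toList 0 'A', PySem.List.pyGetD p.toList 1 'A',
   PySem.List.pyGetD p.toList 2 'A', PySem.List.pyGetD p.toList 3 'A',
   PySem.List.pyGetD p.toList 4 'A']

def build_alignment_from_patterns_py_alt (patterns : List String) : List (String × String) :=
  let init : List (String × String) :=
    [("P1", ""), ("P2", ""), ("P3", ""), ("P4", ""), ("Outgroup", "")]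
  let rows := patterns.map rowOf
  let cols := pyZipCols rows
  (List.zip (init.map (·.1)) cols).foldl
    (fun d kc => setVal d kc.1 (String.ofList (kc.2.map nucOf))) init

-- ===== PRECONDITION & SPEC =====
-- Pre_ excludes exactly the inputs where Python A raises IndexError: some pattern shorter than 5.
def Pre_build_alignment_from_patterns_py (patterns : List String) : Prop :=
  (patterns.all (fun p => 5 ≤ p.toList.length)) = true
instance (patterns : List String) : Decidable (Pre_build_alignment_from_patterns_py patterns) := by
  unfold Pre_build_alignment_from_patterns_py; infer_instance
def pvWitness_build_alignment_from_patterns_py : List String := ["ABABA", "BBBBB"]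

def Spec_build_alignment_from_patterns_py (patterns : List String) (out : List (String × String)) : Prop := out = build_alignment_from_patterns_py_alt patterns
instance (patterns : List String) (out : List (String × String)) : Decidable (Spec_build_alignment_from_patterns_py patterns out) := by unfold Spec_build_alignment_from_patterns_py; infer_instance

-- ===== CLAIM (what is proved, stated in full; the proofs are below) =====
def Claim_equal_build_alignment_from_patterns_py : Prop := ∀ (patterns : List String), Dom_build_alignment_from_patterns_py patterns → Pre_build_alignment_from_patterns_py patterns → Spec_build_alignment_from_patterns_py patterns (build_alignment_from_patterns_py patterns)


-- ===== LEMMAS AND PROOFS =====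
-- all lengths are 5 → running min is 5
theorem foldl_min_five (l : List Nat) (h : ∀ y ∈ l, y = 5) : l.foldl min 5 = 5 := by
  induction l with
  | nil => rfl
  | cons x t ih =>
    have hx := h x (by simp)
    simp [hx, ih (fun y hy => h y (by simp [hy]))]

theorem min?_all_five (l : List Nat) (hne : l ≠ []) (h : ∀ y ∈ l, y = 5) : l.min? = some 5 := by
  cases l with
  | nil => exact absurd rfl hne
  | cons x t =>
    rw [List.min?_cons', h x (by simp)]
    exact congrArg some (foldl_min_five t (fun y hy => h y (by simp [hy])))

-- reading position n of a row is p[n]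
theorem row_getD (p : String) (n : Nat) (hn : n < 5) :
    (rowOf p).getD n 'A' = PySem.List.pyGetD p.toList (n : Int) 'A' := by
  interval_cases n <;> rfl

-- a character of a column equals A's per-position character
theorem col_char_eq (p : String) (n : Nat) (h5 : 5 ≤ p.toList.length) (hn : n < 5) :
    nucOf ((rowOf p).getD n 'A') = nucAt p (n : Int) := by
  have hlt : n < p.toList.length := lt_of_lt_of_le hn h5
  have hget : PySem.List.pyGetD p.toList (n : Int) 'A' = p.toList[n] := by
    rw [PySem.List.pyGetD_natCast, List.getD_eq_getElem _ _ hlt]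
  have hpy : PySem.Str.pyGet? p (n : Int) = some p.toList[n] := by
    simp [PySem.Str.pyGet?, List.getElem?_eq_getElem hlt]
  rw [row_getD p n hn, hget]
  unfold nucOf nucAt
  rw [hpy]
  by_cases hA : p.toList[n] = 'A' <;> simp [hA]

-- one whole column equals A's per-position sequence
theorem col_eq (patterns : List String)
    (hpre : ∀ p ∈ patterns, 5 ≤ p.toList.length) (n : Nat) (hn : n < 5) :
    ((patterns.map rowOf).map (fun r => r.getD n 'A')).map nucOf
      = patterns.map (fun p => nucAt p (n : Int)) := by
  simp only [List.map_map]
  exact List.map_congr_left (fun p hp => col_char_eq p n (hpre p hp) hn)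

-- evaluating B's five dict updates over literal keys
theorem fold_eval (c0 c1 c2 c3 c4 : List Char) :
    (List.zip ((([("P1", ""), ("P2", ""), ("P3", ""), ("P4", ""), ("Outgroup", "")] : List (String × String))).map (·.1))
        [c0, c1, c2, c3, c4]).foldl
      (fun d kc => setVal d kc.1 (String.ofList (kc.2.map nucOf)))
      [("P1", ""), ("P2", ""), ("P3", ""), ("P4", ""), ("Outgroup", "")]
    = [("P1", String.ofList (c0.map nucOf)), ("P2", String.ofList (c1.map nucOf)),
       ("P3", String.ofList (c2.map nucOf)), ("P4", String.ofList (c3.map nucOf)),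
       ("Outgroup", String.ofList (c4.map nucOf))] := by
  rfl

-- ===== VERDICT (by name: the statement is the Claim_ definition above) =====
theorem build_alignment_from_patterns_py_spec : Claim_equal_build_alignment_from_patterns_py := by
  intro patterns _ hpre
  have hpre' : ∀ p ∈ patterns, 5 ≤ p.toList.length := by
    intro p hp
    have := (List.all_eq_true.mp hpre) p hp
    exact Nat.le_of_ble_eq_true (by simpa using this)
  unfold Spec_build_alignment_from_patterns_py build_alignment_from_patterns_py
    build_alignment_from_patterns_py_alt
  cases patterns with
  | nil => rfl
  | cons q qs =>
    have hall : ∀ y ∈ ((q :: qs).map rowOf).map List.length, y = 5 := by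
      intro y hy
      simp only [List.map_map, List.mem_map] at hy
      obtain ⟨p, _, rfl⟩ := hy
      rfl
    have hmin := min?_all_five _ (by simp) hall
    have hc := fun n hn => col_eq (q :: qs) hpre' n hn
    have h0 := hc 0 (by omega); have h1 := hc 1 (by omega); have h2 := hc 2 (by omega)
    have h3 := hc 3 (by omega); have h4 := hc 4 (by omega)
    simp only [Nat.cast_zero, Nat.cast_one, Nat.cast_ofNat] at h0 h1 h2 h3 h4
    set R := (q :: qs).map rowOf with hR
    simp only [pyZipCols, hmin]
    have hrange : (List.range 5).map (fun i => R.map (fun r => r.getD i 'A'))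
        = [R.map (fun r => r.getD 0 'A'), R.map (fun r => r.getD 1 'A'), R.map (fun r => r.getD 2 'A'),
           R.map (fun r => r.getD 3 'A'), R.map (fun r => r.getD 4 'A')] := rfl
    rw [hrange, fold_eval, h0, h1, h2, h3, h4]
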